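-- pv_equiv track=rewrite | github.com/CPHOS/AI_Scoring | src/judge/answer_parser.py | _find_preceding_text
-- ===== SOURCE A (Python) =====
-- def _find_preceding_text(text: str, pos: int) -> str:
--     """Extract a meaningful context snippet before *pos*."""
--     # Take up to 300 chars before the position
--     start = max(0, pos - 300)
--     segment = text[start:pos]
--     # Find the last sentence boundary or paragraph break
--     lines = segment.split("\n")
--     # Return the last non-empty line(s) as context
--     meaningful: list[str] = []
--     for line in reversed(lines):
--         stripped = line.strip()
--         if not stripped:
--             if meaningful:
--                 break
--             continue
--         # Skip lines that are just LaTeX commands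
--         if stripped.startswith("\\solsubq") or stripped.startswith("\\solsubsubq"):
--             continue
--         if stripped.startswith("\\begin{") or stripped.startswith("\\end{"):
--             continue
--         meaningful.append(stripped)
--         if len(meaningful) >= 3:
--             break
--     meaningful.reverse()
--     return " ".join(meaningful)
-- ===== SOURCE B (Python) =====
-- def _find_preceding_text(text: str, pos: int) -> str:
--     """Extract a meaningful context snippet before *pos*."""
--     start = max(0, pos - 300)
--     segment = text[start:pos]
--     skip = ("\\solsubq", "\\solsubsubq", "\\begin{", "\\end{")
--     # Forward decomposition: strip, drop LaTeX-command lines, then group into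
--     # blank-separated paragraphs and keep the last up-to-3 lines of the last one.
--     stripped = [line.strip() for line in segment.split("\n")]
--     kept = [s for s in stripped if not s.startswith(skip)]
--     cur, last = [], []
--     for s in kept:
--         if s:
--             cur.append(s)
--         elif cur:
--             cur, last = [], cur
--     para = cur or last
--     return " ".join(para[-3:])
-- ===== Notes on version B (the rewrite author's own statement) =====
-- stated objective: alternative
-- what changed: Replaces A's reverse stateful scan with early breaks by a forward single pass: strip lines, filter out LaTeX-command lines, fold forward maintaining the current and last completed blank-separated paragraph, then join the last up-to-3 lines of the surviving paragraph.
import Mathlib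
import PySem

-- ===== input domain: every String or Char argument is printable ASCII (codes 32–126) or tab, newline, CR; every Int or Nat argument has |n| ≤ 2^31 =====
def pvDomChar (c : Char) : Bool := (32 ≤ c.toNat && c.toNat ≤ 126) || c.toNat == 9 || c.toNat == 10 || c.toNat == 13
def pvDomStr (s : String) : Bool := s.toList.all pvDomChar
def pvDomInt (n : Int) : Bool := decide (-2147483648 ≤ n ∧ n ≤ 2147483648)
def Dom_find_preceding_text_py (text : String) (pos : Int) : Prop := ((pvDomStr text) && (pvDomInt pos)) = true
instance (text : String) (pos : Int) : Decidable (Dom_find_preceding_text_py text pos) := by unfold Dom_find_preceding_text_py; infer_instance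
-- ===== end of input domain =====

-- B replaces A's reverse stateful scan by a forward filter + paragraph-fold pass (alternative decomposition, same cost).


-- ===== PORT A =====
-- the `for line in reversed(lines)` loop with `break`/`continue`, on the reversed line list
def pvLoopA : List (List Char) → List (List Char) → List (List Char)
  | [], meaningful => meaningful
  | line :: rest, meaningful =>
    let stripped := PySem.Chars.strip line
    if stripped.isEmpty then
      if meaningful.isEmpty then pvLoopA rest meaningful else meaningful
    else if PySem.Chars.startswith stripped "\\solsubq".toList
         || PySem.Chars.startswith stripped "\\solsubsubq".toList then
      pvLoopA rest meaningful
    else if PySem.Chars.startswith stripped "\\begin{".toList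
         || PySem.Chars.startswith stripped "\\end{".toList then
      pvLoopA rest meaningful
    else
      let m := meaningful ++ [stripped]
      if 3 ≤ m.length then m else pvLoopA rest m

def find_preceding_text_py (text : String) (pos : Int) : String :=
  let start : Int := max 0 (pos - 300)
  let segment : List Char := PySem.List.slice text.toList (some start) (some pos)
  let lines := PySem.Chars.splitOn segment ['\n']
  let meaningful := pvLoopA lines.reverse []
  String.ofList (PySem.Chars.join " ".toList meaningful.reverse)

-- ===== PORT B =====
def pvSkipLine (s : List Char) : Bool :=
  PySem.Chars.startswith s "\\solsubq".toList || PySem.Chars.startswith s "\\solsubsubq".toList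
  || PySem.Chars.startswith s "\\begin{".toList || PySem.Chars.startswith s "\\end{".toList

-- body of B's forward `for s in kept` loop
def pvStepB (st : List (List Char) × List (List Char)) (s : List Char) :
    List (List Char) × List (List Char) :=
  if s.isEmpty then (if st.1.isEmpty then st else ([], st.1))
  else (st.1 ++ [s], st.2)

def find_preceding_text_py_alt (text : String) (pos : Int) : String :=
  let start : Int := max 0 (pos - 300)
  let segment : List Char := PySem.List.slice text.toList (some start) (some pos)
  let lines := PySem.Chars.splitOn segment ['\n']
  let stripped := lines.map PySem.Chars.strip
  let kept := stripped.filter (fun s => !pvSkipLine s)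
  let st := kept.foldl pvStepB ([], [])
  let para := if st.1.isEmpty then st.2 else st.1
  String.ofList (PySem.Chars.join " ".toList (PySem.List.slice para (some (-3)) none))

-- ===== PRECONDITION & SPEC =====
def Spec_find_preceding_text_py (text : String) (pos : Int) (out : String) : Prop := out = find_preceding_text_py_alt text pos
instance (text : String) (pos : Int) (out : String) : Decidable (Spec_find_preceding_text_py text pos out) := by unfold Spec_find_preceding_text_py; infer_instance

-- ===== CLAIM (what is proved, stated in full; the proofs are below) =====
def Claim_equal_find_preceding_text_py : Prop := ∀ (text : String) (pos : Int), Dom_find_preceding_text_py text pos → Spec_find_preceding_text_py text pos (find_preceding_text_py text pos)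

-- ===== LEMMAS AND PROOFS =====

-- A's loop on pre-stripped lines (proof helper)
def pvLoopAs : List (List Char) → List (List Char) → List (List Char)
  | [], meaningful => meaningful
  | s :: rest, meaningful =>
    if s.isEmpty then
      if meaningful.isEmpty then pvLoopAs rest meaningful else meaningful
    else if pvSkipLine s then
      pvLoopAs rest meaningful
    else
      let m := meaningful ++ [s]
      if 3 ≤ m.length then m else pvLoopAs rest m

theorem pvLoopA_eq_loopAs (G : List (List Char)) (m : List (List Char)) :
    pvLoopA G m = pvLoopAs (G.map PySem.Chars.strip) m := by
  induction G generalizing m with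
  | nil => rfl
  | cons l rest ih =>
    simp only [pvLoopA, pvLoopAs, List.map, pvSkipLine, Bool.or_assoc]
    split_ifs <;> simp_all

theorem pvSkipLine_not_empty (s : List Char) (h : pvSkipLine s = true) : s.isEmpty = false := by
  rcases s with _ | ⟨c, t⟩
  · simp [pvSkipLine, PySem.Chars.startswith] at h
  · rfl

theorem pvLoopAs_filter (G : List (List Char)) (m : List (List Char)) :
    pvLoopAs G m = pvLoopAs (G.filter (fun s => !pvSkipLine s)) m := by
  induction G generalizing m with
  | nil => rfl
  | cons s rest ih =>
    by_cases hs : pvSkipLine s = true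
    · have he := pvSkipLine_not_empty s hs
      simp [pvLoopAs, List.filter, hs, he, ih]
    · simp only [Bool.not_eq_true] at hs
      simp only [pvLoopAs, List.filter, hs, Bool.not_false]
      split_ifs <;> simp [ih]

theorem pvLoopAs_collect (G : List (List Char)) (m : List (List Char))
    (hskip : ∀ s ∈ G, pvSkipLine s = false) (hne : m ≠ []) (hlen : m.length ≤ 2) :
    pvLoopAs G m = m ++ (G.takeWhile (fun s => !s.isEmpty)).take (3 - m.length) := by
  induction G generalizing m with
  | nil => simp [pvLoopAs]
  | cons s rest ih =>
    have hs := hskip s (by simp)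
    by_cases he : s.isEmpty = true
    · simp [pvLoopAs, hne, List.isEmpty_iff.mp he]
    · simp only [Bool.not_eq_true] at he
      by_cases h3 : 3 ≤ (m ++ [s]).length
      · have hm3 : m.length = 2 := by simp at h3; omega
        simp [pvLoopAs, he, hs, hm3]
      · have hrec := ih (m ++ [s]) (fun t ht => hskip t (by simp [ht]))
          (by simp) (by simp at h3 ⊢; omega)
        have hlen' : (m ++ [s]).length = m.length + 1 := by simp
        simp only [pvLoopAs, he, hs, if_false, h3, Bool.false_eq_true]
        rw [hrec, hlen']
        have : 3 - m.length = (3 - (m.length + 1)) + 1 := by omega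
        simp [he, this, List.take_succ_cons]
  
theorem pvLoopAs_core (G : List (List Char))
    (hskip : ∀ s ∈ G, pvSkipLine s = false) :
    pvLoopAs G [] = ((G.dropWhile (fun s => s.isEmpty)).takeWhile (fun s => !s.isEmpty)).take 3 := by
  induction G with
  | nil => rfl
  | cons s rest ih =>
    have hs := hskip s (by simp)
    by_cases he : s.isEmpty = true
    · simp [pvLoopAs, he, ih (fun t ht => hskip t (by simp [ht]))]
    · simp only [Bool.not_eq_true] at he
      have hrec := pvLoopAs_collect rest [s] (fun t ht => hskip t (by simp [ht]))
        (by simp) (by simp)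
      simp [pvLoopAs, he, hs, hrec, List.take_succ_cons]

theorem pvFoldB_inv (F : List (List Char)) :
    (F.foldl pvStepB ([], [])).1
      = ((F.reverse.takeWhile (fun s => !s.isEmpty))).reverse ∧
    (if (F.foldl pvStepB ([], [])).1.isEmpty then (F.foldl pvStepB ([], [])).2
       else (F.foldl pvStepB ([], [])).1)
      = ((F.reverse.dropWhile (fun s => s.isEmpty)).takeWhile (fun s => !s.isEmpty)).reverse := by
  induction F using List.reverseRecOn with
  | nil => simp
  | append_singleton F s ih =>
    obtain ⟨ih1, ih2⟩ := ih
    rw [List.foldl_append, List.foldl_cons, List.foldl_nil]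
    by_cases he : s.isEmpty = true
    · have hs : s = [] := List.isEmpty_iff.mp he
      subst hs
      by_cases h1 : (List.foldl pvStepB ([], []) F).1.isEmpty = true
      · simp only [h1, if_true] at ih2
        simp only [pvStepB, List.isEmpty_nil, if_true, h1]
        refine ⟨by simp [List.isEmpty_iff.mp h1], ?_⟩
        simp only [List.reverse_append, List.reverse_cons, List.reverse_nil,
          List.nil_append, List.singleton_append, List.dropWhile_cons, List.isEmpty_nil,
          if_true, ih2]
      · simp only [pvStepB, List.isEmpty_nil, if_true, h1]
        refine ⟨by simp, ?_⟩
        rw [if_neg h1] at ih2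
        simp only [List.isEmpty_nil, List.reverse_append, List.reverse_cons, List.reverse_nil,
          List.nil_append, List.singleton_append, List.dropWhile_cons, if_true]
        simpa using ih2
    · simp only [Bool.not_eq_true] at he
      constructor
      · simp [pvStepB, he, ih1]
      · simp [pvStepB, he, ih1]

theorem pvDropReverse (X : List (List Char)) :
    (X.reverse).drop (X.reverse.length - 3) = (X.take 3).reverse := by
  rw [List.reverse_take]
  simp

theorem pvMain (lines : List (List Char)) :
    (pvLoopA lines.reverse []).reverse
      = PySem.List.slice
          (if ((((lines.map PySem.Chars.strip).filter (fun s => !pvSkipLine s)).foldl pvStepB ([], [])).1).isEmpty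
            then ((((lines.map PySem.Chars.strip).filter (fun s => !pvSkipLine s)).foldl pvStepB ([], [])).2)
            else ((((lines.map PySem.Chars.strip).filter (fun s => !pvSkipLine s)).foldl pvStepB ([], [])).1))
          (some (-3)) none := by
  set F := (lines.map PySem.Chars.strip).filter (fun s => !pvSkipLine s) with hF
  have hA : pvLoopA lines.reverse [] =
      ((F.reverse.dropWhile (fun s => s.isEmpty)).takeWhile (fun s => !s.isEmpty)).take 3 := by
    rw [pvLoopA_eq_loopAs, pvLoopAs_filter]
    rw [show (lines.reverse.map PySem.Chars.strip).filter (fun s => !pvSkipLine s) = F.reverse by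
      simp [hF, List.filter_reverse, List.map_reverse]]
    exact pvLoopAs_core _ (by
      intro s hs
      have := List.of_mem_filter (List.mem_reverse.mp hs)
      simpa using this)
  obtain ⟨_, h2⟩ := pvFoldB_inv F
  rw [hA, h2, PySem.List.slice_from_neg_ofNat _ 3 (by omega)]
  exact (pvDropReverse _).symm

-- ===== VERDICT (by name: the statement is the Claim_ definition above) =====
theorem find_preceding_text_py_spec : Claim_equal_find_preceding_text_py := by
  intro text pos _
  unfold Spec_find_preceding_text_py find_preceding_text_py find_preceding_text_py_alt
  simp only []
  rw [← pvMain]
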